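-- pv_equiv track=rewrite | github.com/Mauro2298/Integrated_System_Architecture_Labs | LAB_2_ISA/PythonScripts/DaddaOurMatr.py | initMatrix
-- ===== SOURCE A (Python) =====
-- def initMatrix(nb):
--     matrix = []
--     n = nb*2
--     #nb = 32
--     pari = 2
--     dispari = 1
--     for i in range(n):
--         if i < nb:
--             #se il numero e' pari
--             if (i % 2 == 0):
--                 test = "1 " * (pari)
--                 valCol = test.split()
--                 matrix.append(valCol)
--                 pari += 1
--             else:
--                 test = "1 " * (dispari)
--                 valCol = test.split()
--                 matrix.append(valCol)
--                 dispari += 1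
--         elif i < nb + 4:
--             test = "1 " * (int(nb / 2) + 1)
--             valCol = test.split()
--             matrix.append(valCol)
--             dispari = int(nb / 2)-1
--             pari = int(nb / 2)
--         else:
--             if (i % 2 == 0):
--                 test = "1 " * (pari)
--                 valCol = test.split()
--                 matrix.append(valCol)
--                 pari -= 1
--             else:
--                 test = "1 " * (dispari)
--                 valCol = test.split()
--                 matrix.append(valCol)
--                 dispari -= 1
--     return matrix
-- ===== SOURCE B (Python) =====
-- def initMatrix(nb):
--     # closed-form row lengths instead of running pari/dispari counters
--     m = nb // 2
--     def rowlen(i):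
--         if i < nb:
--             return i // 2 + (2 if i % 2 == 0 else 1)
--         if i < nb + 4:
--             return m + 1
--         if i % 2 == 0:
--             return m - ((i + 1) // 2 - (nb + 5) // 2)
--         return m - 1 - (i // 2 - (nb + 4) // 2)
--     return [['1'] * rowlen(i) for i in range(2 * nb)]
-- ===== Notes on version B (the rewrite author's own statement) =====
-- stated objective: simpler
-- what changed: B drops the mutating pari/dispari counters and per-iteration resets, computing each row length directly as a closed-form function of the index i (one comprehension over range(2*nb)), building each row as ['1']*length instead of building and splitting a string.
import Mathlib
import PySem

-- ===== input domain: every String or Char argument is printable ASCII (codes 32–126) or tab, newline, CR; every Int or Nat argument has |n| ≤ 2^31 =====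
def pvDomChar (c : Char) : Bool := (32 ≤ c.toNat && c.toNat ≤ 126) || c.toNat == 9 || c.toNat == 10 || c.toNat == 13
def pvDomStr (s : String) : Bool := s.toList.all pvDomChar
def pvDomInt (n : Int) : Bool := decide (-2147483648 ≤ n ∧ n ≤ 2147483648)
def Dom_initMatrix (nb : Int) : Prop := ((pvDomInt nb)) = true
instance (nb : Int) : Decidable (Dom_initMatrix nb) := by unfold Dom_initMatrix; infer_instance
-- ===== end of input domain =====

-- B replaces the mutating pari/dispari counters by a closed-form row length per index (objective: simpler).

-- ===== PORT A =====
-- ('1 ' * k).split(): string repetition is not in PySem, so the repetition is ported by hand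
-- (exact: '1 ' * k is k concatenated copies of the chars '1',' ', and the empty string for k ≤ 0),
-- then PySem.Str.split₀ is Python's .split().
def pyOnesRow (k : Int) : List String :=
  PySem.Str.split₀ (String.ofList (List.flatten (List.replicate k.toNat ['1', ' '])))

-- the body of A's for-loop, on the state (matrix, pari, dispari)
def stepA (nb : Int) (st : List (List String) × Int × Int) (i : Int) :
    List (List String) × Int × Int :=
  if i < nb then
    if PySem.Int.mod i 2 == 0 then (st.1 ++ [pyOnesRow st.2.1], st.2.1 + 1, st.2.2)
    else (st.1 ++ [pyOnesRow st.2.2], st.2.1, st.2.2 + 1)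
  else if i < nb + 4 then
    -- int(nb / 2) is PySem.Int.truncdiv nb 2 (exact: |nb| ≤ 2^31 < 2^53 on Dom)
    (st.1 ++ [pyOnesRow (PySem.Int.truncdiv nb 2 + 1)],
      PySem.Int.truncdiv nb 2, PySem.Int.truncdiv nb 2 - 1)
  else
    if PySem.Int.mod i 2 == 0 then (st.1 ++ [pyOnesRow st.2.1], st.2.1 - 1, st.2.2)
    else (st.1 ++ [pyOnesRow st.2.2], st.2.1, st.2.2 - 1)

def initMatrix (nb : Int) : List (List String) :=
  ((PySem.List.pyRange 0 (nb * 2) 1).foldl (stepA nb) ([], 2, 1)).1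

-- ===== PORT B =====
-- closed-form length of row i (Source B's rowlen; // is PySem.Int.floordiv, % is PySem.Int.mod)
def rowLen (nb i : Int) : Int :=
  if i < nb then
    PySem.Int.floordiv i 2 + (if PySem.Int.mod i 2 == 0 then 2 else 1)
  else if i < nb + 4 then
    PySem.Int.floordiv nb 2 + 1
  else if PySem.Int.mod i 2 == 0 then
    PySem.Int.floordiv nb 2
      - (PySem.Int.floordiv (i + 1) 2 - PySem.Int.floordiv (nb + 5) 2)
  else
    PySem.Int.floordiv nb 2 - 1
      - (PySem.Int.floordiv i 2 - PySem.Int.floordiv (nb + 4) 2)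

def initMatrix_alt (nb : Int) : List (List String) :=
  (PySem.List.pyRange 0 (2 * nb) 1).map (fun i => List.replicate (rowLen nb i).toNat "1")

-- ===== PRECONDITION & SPEC =====
def Spec_initMatrix (nb : Int) (out : List (List String)) : Prop := out = initMatrix_alt nb
instance (nb : Int) (out : List (List String)) : Decidable (Spec_initMatrix nb out) := by unfold Spec_initMatrix; infer_instance

-- ===== CLAIM (what is proved, stated in full; the proofs are below) =====
def Claim_equal_initMatrix : Prop := ∀ (nb : Int), Dom_initMatrix nb → Spec_initMatrix nb (initMatrix nb)

-- ===== LEMMAS AND PROOFS =====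

-- A's counters, in closed form at the start of iteration t
def Pcnt (nb t : Int) : Int :=
  if t ≤ nb then 2 + (t + 1) / 2
  else if t ≤ nb + 4 then nb / 2
  else nb / 2 - ((t + 1) / 2 - (nb + 5) / 2)

def Dcnt (nb t : Int) : Int :=
  if t ≤ nb then 1 + t / 2
  else if t ≤ nb + 4 then nb / 2 - 1
  else nb / 2 - 1 - (t / 2 - (nb + 4) / 2)

lemma split_go_ones (n : Nat) (acc : List (List Char)) :
    PySem.Chars.split₀.go (List.flatten (List.replicate n ['1', ' '])) [] acc
      = acc.reverse ++ List.replicate n ['1'] := by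
  induction n generalizing acc with
  | zero => simp [PySem.Chars.split₀.go]
  | succ n ih =>
      simp only [List.replicate_succ, List.flatten_cons, List.cons_append, List.nil_append]
      simp only [PySem.Chars.split₀.go]
      rw [if_neg (by decide), if_pos (by decide)]
      simp only [List.isEmpty_cons, List.reverse_cons, List.reverse_nil, List.nil_append]
      rw [if_neg (by decide), ih]
      simp

lemma pyOnesRow_eq (k : Int) : pyOnesRow k = List.replicate k.toNat "1" := by
  simp only [pyOnesRow, PySem.Str.split₀, PySem.Chars.split₀]
  rw [String.toList_ofList, split_go_ones]
  simp [List.map_replicate]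

lemma truncdiv_two (nb : Int) (h : 0 ≤ nb) : PySem.Int.truncdiv nb 2 = nb / 2 := by
  simp only [PySem.Int.truncdiv]
  exact Int.tdiv_eq_ediv_of_nonneg h

lemma stepA_closed (nb t : Int) (h1 : 1 ≤ nb) (h0 : 0 ≤ t) (h2 : t < 2 * nb)
    (M : List (List String)) :
    stepA nb (M, Pcnt nb t, Dcnt nb t) t
      = (M ++ [List.replicate (rowLen nb t).toNat "1"], Pcnt nb (t + 1), Dcnt nb (t + 1)) := by
  have hm : PySem.Int.mod t 2 = t % 2 := PySem.Int.mod_eq_emod_of_pos (by norm_num)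
  have htd : PySem.Int.truncdiv nb 2 = nb / 2 := truncdiv_two nb (by omega)
  have hfd : ∀ a : Int, PySem.Int.floordiv a 2 = a / 2 :=
    fun a => PySem.Int.floordiv_eq_ediv_of_pos (by norm_num)
  simp only [stepA, rowLen, Pcnt, Dcnt, pyOnesRow_eq, hm, htd, hfd, beq_iff_eq]
  split_ifs <;> simp_all <;> omega

lemma loop_inv (nb : Int) (h1 : 1 ≤ nb) :
    ∀ (k : Nat) (t : Int), 0 ≤ t → t ≤ 2 * nb → (2 * nb - t).toNat = k →
    ∀ (M : List (List String)),
    ((PySem.List.pyRange t (2 * nb) 1).foldl (stepA nb) (M, Pcnt nb t, Dcnt nb t)).1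
      = M ++ (PySem.List.pyRange t (2 * nb) 1).map
          (fun i => List.replicate (rowLen nb i).toNat "1") := by
  intro k
  induction k with
  | zero =>
      intro t h0 hle hk M
      rw [PySem.List.pyRange_one_eq_nil (by omega)]
      simp
  | succ k ih =>
      intro t h0 hle hk M
      have htlt : t < 2 * nb := by omega
      rw [PySem.List.pyRange_one_cons htlt]
      simp only [List.foldl_cons, List.map_cons]
      rw [stepA_closed nb t h1 h0 htlt M,
        ih (t + 1) (by omega) (by omega) (by omega)]
      simp

theorem initMatrix_spec' (nb : Int) : initMatrix nb = initMatrix_alt nb := by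
  by_cases h : nb ≤ 0
  · unfold initMatrix initMatrix_alt
    rw [show nb * 2 = 2 * nb from by ring, PySem.List.pyRange_one_eq_nil (by omega)]
    simp
  · unfold initMatrix initMatrix_alt
    rw [show nb * 2 = 2 * nb from by ring]
    have h0 : Pcnt nb 0 = 2 := by unfold Pcnt; rw [if_pos (by omega)]; norm_num
    have h0' : Dcnt nb 0 = 1 := by unfold Dcnt; rw [if_pos (by omega)]; norm_num
    have key := loop_inv nb (by omega) (2 * nb - 0).toNat 0 le_rfl (by omega) rfl []
    rw [h0, h0'] at key
    simpa using key

-- ===== VERDICT (by name: the statement is the Claim_ definition above) =====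
theorem initMatrix_spec : Claim_equal_initMatrix := by
  intro nb _
  exact initMatrix_spec' nb
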